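-- pv_equiv track=rewrite | github.com/Julmust/advent-of-code-2025 | utils/array_functions.py | pad_2d_array
-- ===== SOURCE A (Python) =====
-- from typing import List, TypeVar
--
-- T = TypeVar("T", int, str)
--
-- def _validate_array(array: List[List[T]], padding: int) -> int:
--     """
--     Validate the input array and padding parameters.
--
--     Args:
--         array: The 2D array to validate.
--         padding: The padding value to validate.
--
--     Returns:
--         The length of the first row (number of columns).
--
--     Raises:
--         ValueError: If the array is empty, not rectangular, or padding is negative.
--         TypeError: If the input is not a valid 2D array structure.
--     """
--     # Validate input array is not None
--     if array is None:
--         raise TypeError("Array cannot be None")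
--
--     # Validate array is not empty
--     if not array or len(array) == 0:
--         raise ValueError("Array cannot be empty")
--
--     # Validate array is a list of lists
--     if not isinstance(array, list) or not all(isinstance(row, list) for row in array):
--         raise TypeError("Input must be a 2D array (list of lists)")
--
--     # Validate array is not empty and rows are not empty
--     if any(len(row) == 0 for row in array):
--         raise ValueError("Array rows cannot be empty")
--
--     # Validate array is rectangular (all rows have the same length)
--     first_row_length = len(array[0])
--     if not all(len(row) == first_row_length for row in array):
--         raise ValueError(
--             "Array must be rectangular (all rows must have the same length)"
--         )
--
--     # Validate padding is non-negative
--     if padding < 0: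
--         raise ValueError("Padding must be non-negative")
--
--     return first_row_length
--
-- def pad_2d_array(array: List[List[T]], padding: int, padding_char: T) -> List[List[T]]:
--     """
--     Pad a 2D array with a specified character on all sides.
--
--     Args:
--         array: The 2D array to pad (list of lists).
--         padding: The number of rows/columns to add on each side.
--         padding_char: The character/value to use for padding.
--
--     Returns:
--         A new 2D array with padding applied on all sides.
--
--     Raises:
--         ValueError: If the array is empty, not rectangular, or padding is negative.
--         TypeError: If the input is not a valid 2D array structure.
--
--     Example:
--         >>> array = [[1, 1, 1], [1, 1, 1], [1, 1, 1]]
--         >>> padded = pad_2d_array(array, 2, 0)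
--         >>> # Returns:
--         >>> # [[0,0,0,0,0,0,0],
--         >>> #  [0,0,0,0,0,0,0],
--         >>> #  [0,0,1,1,1,0,0],
--         >>> #  [0,0,1,1,1,0,0],
--         >>> #  [0,0,1,1,1,0,0],
--         >>> #  [0,0,0,0,0,0,0],
--         >>> #  [0,0,0,0,0,0,0]]
--     """
--     # Validate input and get dimensions
--     first_row_length = _validate_array(array, padding)
--
--     # Early return for zero padding
--     if padding == 0:
--         return [row[:] for row in array]
--
--     # Calculate dimensions of the padded array
--     original_rows = len(array)
--     original_cols = first_row_length
--     padded_rows = original_rows + 2 * padding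
--     padded_cols = original_cols + 2 * padding
--
--     # Create the padded array filled with padding character
--     padded_array: List[List[T]] = [
--         [padding_char for _ in range(padded_cols)] for _ in range(padded_rows)
--     ]
--
--     # Copy original array into the center of the padded array
--     for i, row in enumerate(array):
--         for j, value in enumerate(row):
--             padded_array[i + padding][j + padding] = value
--
--     return padded_array
-- ===== SOURCE B (Python) =====
-- from typing import List, TypeVar
--
-- T = TypeVar("T", int, str)
--
-- def _validate_array(array: List[List[T]], padding: int) -> int:
--     if array is None:
--         raise TypeError("Array cannot be None")
--     if not array or len(array) == 0:
--         raise ValueError("Array cannot be empty")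
--     if not isinstance(array, list) or not all(isinstance(row, list) for row in array):
--         raise TypeError("Input must be a 2D array (list of lists)")
--     if any(len(row) == 0 for row in array):
--         raise ValueError("Array rows cannot be empty")
--     first_row_length = len(array[0])
--     if not all(len(row) == first_row_length for row in array):
--         raise ValueError(
--             "Array must be rectangular (all rows must have the same length)"
--         )
--     if padding < 0:
--         raise ValueError("Padding must be non-negative")
--     return first_row_length
--
-- def pad_2d_array(array: List[List[T]], padding: int, padding_char: T) -> List[List[T]]:
--     first_row_length = _validate_array(array, padding)
--     if padding == 0:
--         return [row[:] for row in array]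
--     padded_cols = first_row_length + 2 * padding
--     top = [[padding_char] * padded_cols for _ in range(padding)]
--     bottom = [[padding_char] * padded_cols for _ in range(padding)]
--     side = [padding_char] * padding
--     return top + [side + row + side for row in array] + bottom
-- ===== Notes on version B (the rewrite author's own statement) =====
-- stated objective: simpler
-- what changed: B assembles each output row directly by concatenation (padding rows plus side+row+side) in a single pass instead of allocating a full grid of padding_char and overwriting its center with a nested index loop.
import Mathlib
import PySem

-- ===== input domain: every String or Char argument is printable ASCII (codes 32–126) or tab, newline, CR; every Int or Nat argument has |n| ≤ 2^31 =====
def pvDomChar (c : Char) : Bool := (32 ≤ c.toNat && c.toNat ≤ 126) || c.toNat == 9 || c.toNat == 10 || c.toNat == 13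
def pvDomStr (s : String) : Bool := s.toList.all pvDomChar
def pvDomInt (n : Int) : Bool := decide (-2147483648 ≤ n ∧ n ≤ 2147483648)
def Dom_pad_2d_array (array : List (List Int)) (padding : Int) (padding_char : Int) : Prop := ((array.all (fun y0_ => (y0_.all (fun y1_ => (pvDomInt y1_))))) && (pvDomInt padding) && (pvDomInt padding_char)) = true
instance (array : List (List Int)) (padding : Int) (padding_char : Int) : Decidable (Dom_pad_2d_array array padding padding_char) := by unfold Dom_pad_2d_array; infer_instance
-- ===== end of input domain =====

-- B builds each padded row by concatenation (padding rows, then side ++ row ++ side) in one pass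
-- instead of allocating a grid of padding_char and overwriting its center with a nested index loop.


-- ===== PORT A =====
-- padded_array[i][j] = value  (Python list assignment; exact for the in-range indices Pre_ guarantees)
def pvAssign (g : List (List Int)) (i j : Int) (v : Int) : List (List Int) :=
  PySem.List.pySetD g i (PySem.List.pySetD (PySem.List.pyGetD g i []) j v)

def pad_2d_array (array : List (List Int)) (padding : Int) (padding_char : Int) : List (List Int) :=
  if padding = 0 then array.map (fun row => row)  -- [row[:] for row in array]
  else
    let original_rows := array.length
    let original_cols := (array.headD []).length
    let padded_rows := (original_rows : Int) + 2 * padding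
    let padded_cols := (original_cols : Int) + 2 * padding
    let padded_array := List.replicate padded_rows.toNat (List.replicate padded_cols.toNat padding_char)
    (PySem.List.enumerate array 0).foldl (fun g p =>
      (PySem.List.enumerate p.2 0).foldl (fun g q =>
        pvAssign g (p.1 + padding) (q.1 + padding) q.2) g) padded_array

-- ===== PORT B =====
def pad_2d_array_alt (array : List (List Int)) (padding : Int) (padding_char : Int) : List (List Int) :=
  if padding = 0 then array.map (fun row => row)
  else
    let p := padding.toNat
    let padded_cols := (array.headD []).length + 2 * p
    let prow := List.replicate padded_cols padding_char
    let side := List.replicate p padding_char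
    List.replicate p prow ++ array.map (fun row => side ++ row ++ side) ++ List.replicate p prow

-- ===== PRECONDITION & SPEC =====
-- Pre_ excludes exactly the inputs where A raises ValueError: empty array, empty or ragged rows,
-- or negative padding.
def Pre_pad_2d_array (array : List (List Int)) (padding : Int) (padding_char : Int) : Prop :=
  array ≠ [] ∧ (∀ row ∈ array, row.length = (array.headD []).length) ∧
    (array.headD []) ≠ [] ∧ 0 ≤ padding
instance (array : List (List Int)) (padding : Int) (padding_char : Int) : Decidable (Pre_pad_2d_array array padding padding_char) := by unfold Pre_pad_2d_array; infer_instance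
def pvWitness_pad_2d_array : List (List Int) × Int × Int := ([[1, 2], [3, 4]], 1, 0)

def Spec_pad_2d_array (array : List (List Int)) (padding : Int) (padding_char : Int) (out : List (List Int)) : Prop := out = pad_2d_array_alt array padding padding_char
instance (array : List (List Int)) (padding : Int) (padding_char : Int) (out : List (List Int)) : Decidable (Spec_pad_2d_array array padding padding_char out) := by unfold Spec_pad_2d_array; infer_instance

-- ===== CLAIM (what is proved, stated in full; the proofs are below) =====
def Claim_equal_pad_2d_array : Prop := ∀ (array : List (List Int)) (padding : Int) (padding_char : Int), Dom_pad_2d_array array padding padding_char → Pre_pad_2d_array array padding padding_char → Spec_pad_2d_array array padding padding_char (pad_2d_array array padding padding_char)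

-- ===== LEMMAS AND PROOFS =====

lemma pv_set_append_len {α : Type} : ∀ (pre : List α) (y : α) (t : List α) (v : α),
    (pre ++ y :: t).set pre.length v = pre ++ v :: t := by
  intro pre; induction pre with
  | nil => simp
  | cons a pre ih => intro y t v; simp [ih]

lemma pv_getD_append_len {α : Type} : ∀ (pre : List α) (y : α) (t : List α) (d : α),
    (pre ++ y :: t).getD pre.length d = y := by
  intro pre; induction pre with
  | nil => simp
  | cons a pre ih => intro y t d; simpa using ih y t d

lemma pv_assign_eq (g : List (List Int)) (i j : Int) (v : Int) (hi : 0 ≤ i) (hj : 0 ≤ j) :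
    pvAssign g i j v = g.set i.toNat ((g.getD i.toNat []).set j.toNat v) := by
  simp [pvAssign, PySem.List.pySetD_of_nonneg, PySem.List.pyGetD_of_nonneg, hi, hj,
    List.getD_eq_getElem?_getD]

-- the inner fold touches only row (i+padding) of the grid: it factors through a fold on that row
lemma pv_inner_factor (i padding : Int) (hip : 0 ≤ i + padding) (hp : 0 ≤ padding) :
    ∀ (row : List Int) (j : Int) (g : List (List Int)), 0 ≤ j → (i + padding).toNat < g.length →
      (PySem.List.enumerate row j).foldl (fun g q => pvAssign g (i + padding) (q.1 + padding) q.2) g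
      = g.set (i + padding).toNat
          ((PySem.List.enumerate row j).foldl (fun rw q => rw.set (q.1 + padding).toNat q.2)
            (g.getD (i + padding).toNat [])) := by
  intro row
  induction row with
  | nil =>
    intro j g _ hlt
    simp only [PySem.List.enumerate_nil, List.foldl_nil]
    rw [List.getD_eq_getElem _ _ hlt, List.set_getElem_self]
  | cons v rest ih =>
    intro j g hj hlt
    rw [PySem.List.enumerate_cons]
    simp only [List.foldl_cons]
    rw [pv_assign_eq _ _ _ _ hip (by omega)]
    rw [ih (j + 1) _ (by omega) (by simpa using hlt)]
    rw [List.set_set]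
    congr 1
    rw [List.getD_eq_getElem _ _ (by simpa using hlt), List.getElem_set_self,
      List.getD_eq_getElem _ _ hlt]

-- the single-row fold writes the row values into the middle of a padding row
lemma pv_row_fold (padding pc : Int) (hp : 0 ≤ padding) :
    ∀ (row : List Int) (j : Int) (pre suf : List Int), 0 ≤ j → pre.length = (j + padding).toNat →
      (PySem.List.enumerate row j).foldl (fun rw q => rw.set (q.1 + padding).toNat q.2)
        (pre ++ List.replicate row.length pc ++ suf)
      = pre ++ row ++ suf := by
  intro row
  induction row with
  | nil => intro j pre suf _ _; simp [PySem.List.enumerate_nil]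
  | cons v rest ih =>
    intro j pre suf hj hpre
    rw [PySem.List.enumerate_cons]
    simp only [List.foldl_cons, List.length_cons, List.replicate_succ, List.cons_append,
      List.append_assoc] at *
    rw [← hpre, pv_set_append_len]
    have h2 : pre ++ v :: (List.replicate rest.length pc ++ suf)
        = (pre ++ [v]) ++ (List.replicate rest.length pc ++ suf) := by simp
    rw [h2]
    have := ih (j + 1) (pre ++ [v]) suf (by omega) (by simp [hpre]; omega)
    simpa [List.append_assoc] using this

-- the outer fold replaces the middle rows of the grid one by one
lemma pv_outer_fold (padding pc : Int) (hp : 0 ≤ padding) (cols : Nat) :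
    ∀ (rest : List (List Int)) (i : Int) (top bot : List (List Int)), 0 ≤ i →
      top.length = (i + padding).toNat → (∀ row ∈ rest, row.length = cols) →
      (PySem.List.enumerate rest i).foldl (fun g p =>
          (PySem.List.enumerate p.2 0).foldl (fun g q =>
            pvAssign g (p.1 + padding) (q.1 + padding) q.2) g)
        (top ++ List.replicate rest.length (List.replicate (cols + 2 * padding.toNat) pc) ++ bot)
      = top ++ rest.map (fun row =>
          List.replicate padding.toNat pc ++ row ++ List.replicate padding.toNat pc) ++ bot := by
  intro rest
  induction rest with
  | nil => intro i top bot _ _ _; simp [PySem.List.enumerate_nil]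
  | cons row rest ih =>
    intro i top bot hi htop hlen
    have hip : 0 ≤ i + padding := by omega
    rw [PySem.List.enumerate_cons]
    simp only [List.foldl_cons, List.length_cons, List.replicate_succ, List.cons_append,
      List.append_assoc]
    have hlt : (i + padding).toNat <
        (top ++ (List.replicate (cols + 2 * padding.toNat) pc ::
          (List.replicate rest.length (List.replicate (cols + 2 * padding.toNat) pc) ++ bot))).length := by
      simp; omega
    rw [pv_inner_factor i padding hip hp row 0 _ le_rfl hlt]
    rw [← htop, pv_getD_append_len]
    have hsplit : List.replicate (cols + 2 * padding.toNat) pc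
        = List.replicate padding.toNat pc ++ List.replicate row.length pc ++
          List.replicate padding.toNat pc := by
      rw [hlen row (by simp), List.replicate_append_replicate, List.replicate_append_replicate]
      congr 1; omega
    have hrow : (PySem.List.enumerate row 0).foldl (fun rw q => rw.set (q.1 + padding).toNat q.2)
          (List.replicate (cols + 2 * padding.toNat) pc)
        = List.replicate padding.toNat pc ++ row ++ List.replicate padding.toNat pc := by
      rw [hsplit]
      exact pv_row_fold padding pc hp row 0 (List.replicate padding.toNat pc)
        (List.replicate padding.toNat pc) le_rfl (by simp)
    rw [hrow, pv_set_append_len]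
    have h2 : top ++ (List.replicate padding.toNat pc ++ row ++ List.replicate padding.toNat pc) ::
          (List.replicate rest.length (List.replicate (cols + 2 * padding.toNat) pc) ++ bot)
        = (top ++ [List.replicate padding.toNat pc ++ row ++ List.replicate padding.toNat pc]) ++
          List.replicate rest.length (List.replicate (cols + 2 * padding.toNat) pc) ++ bot := by
      simp
    rw [h2, ih (i + 1) _ bot (by omega) (by simp [htop]; omega)
      (fun r hr => hlen r (by simp [hr]))]
    simp

-- ===== VERDICT (by name: the statement is the Claim_ definition above) =====
theorem pad_2d_array_spec : Claim_equal_pad_2d_array := by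
  intro array padding padding_char _ hpre
  obtain ⟨hne, hrect, hhead, hp⟩ := hpre
  unfold Spec_pad_2d_array pad_2d_array pad_2d_array_alt
  by_cases h0 : padding = 0
  · simp [h0]
  · simp only [if_neg h0]
    set cols := (array.headD []).length with hcols
    have hgrid : List.replicate ((array.length : Int) + 2 * padding).toNat
          (List.replicate ((cols : Int) + 2 * padding).toNat padding_char)
        = List.replicate padding.toNat (List.replicate (cols + 2 * padding.toNat) padding_char) ++
          List.replicate array.length (List.replicate (cols + 2 * padding.toNat) padding_char) ++
          List.replicate padding.toNat (List.replicate (cols + 2 * padding.toNat) padding_char) := by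
      have e1 : ((array.length : Int) + 2 * padding).toNat
          = padding.toNat + array.length + padding.toNat := by omega
      have e2 : ((cols : Int) + 2 * padding).toNat = cols + 2 * padding.toNat := by omega
      rw [e1, e2, List.replicate_add, List.replicate_add]
    rw [hgrid,
      pv_outer_fold padding padding_char hp cols array 0
        (List.replicate padding.toNat (List.replicate (cols + 2 * padding.toNat) padding_char))
        (List.replicate padding.toNat (List.replicate (cols + 2 * padding.toNat) padding_char))
        le_rfl (by simp) (fun r hr => hrect r hr)]
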